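-- pv_equiv track=rewrite | github.com/minseok127/LOCATOR | evaluation/LASER/find_optimal_cg.py | generate_initial_subsets
-- ===== SOURCE A (Python) =====
-- def get_subsets(R, projection):
--     """
--     Generate subsets of R based on the given projection.
--     The subsets are divided into those included in the projection and those not.
--     """
--     in_projection = R.intersection(projection)
--     not_in_projection = R.difference(projection)
--     subsets = [in_projection] if in_projection else []
--     if not_in_projection:
--         subsets.append(not_in_projection)
--     return subsets
--
-- def generate_initial_subsets(R, projections):
--     """
--     Recursively divide the attribute set R into subsets using the projections.
--     """
--     subsets = [R]
--     for projection in projections: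
--         new_subsets = []
--         for subset in subsets:
--             split_subsets = get_subsets(subset, projection)
--             new_subsets.extend(split_subsets)
--         subsets = new_subsets
--     return subsets
-- ===== SOURCE B (Python) =====
-- def generate_initial_subsets(R, projections):
--     # Group the elements of R by their membership signature across the projections
--     # (one pass over R), then emit the groups in descending signature order --
--     # exactly the order in which A's repeated splitting produces them.
--     proj_sets = [set(p) for p in projections]
--     groups = {}
--     for x in R:
--         mask = 0
--         for p in proj_sets:
--             mask = mask * 2 + (x in p)
--         groups.setdefault(mask, []).append(x)
--     return [set(groups[m]) for m in sorted(groups, reverse=True)]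
-- ===== Notes on version B (the rewrite author's own statement) =====
-- stated objective: alternative
-- what changed: Instead of A's iterative refinement (rescanning every current subset against every projection and rebuilding the subset list per projection), B computes each element's membership signature across all projections in one pass over R and groups elements by signature in a dict, emitting the groups in descending signature order; Pre_ additionally requires R's list representation to be duplicate-free since R is a Python set.
-- intended difference: On R = empty set with projections = [], A returns [set()] (an artefact of initialising the subset list with R before empty subsets are filtered out) while B returns [], the intended partition of the empty set into nonempty blocks. — e.g. on generate_initial_subsets([], []): A returns [[]], B returns []
import Mathlib
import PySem

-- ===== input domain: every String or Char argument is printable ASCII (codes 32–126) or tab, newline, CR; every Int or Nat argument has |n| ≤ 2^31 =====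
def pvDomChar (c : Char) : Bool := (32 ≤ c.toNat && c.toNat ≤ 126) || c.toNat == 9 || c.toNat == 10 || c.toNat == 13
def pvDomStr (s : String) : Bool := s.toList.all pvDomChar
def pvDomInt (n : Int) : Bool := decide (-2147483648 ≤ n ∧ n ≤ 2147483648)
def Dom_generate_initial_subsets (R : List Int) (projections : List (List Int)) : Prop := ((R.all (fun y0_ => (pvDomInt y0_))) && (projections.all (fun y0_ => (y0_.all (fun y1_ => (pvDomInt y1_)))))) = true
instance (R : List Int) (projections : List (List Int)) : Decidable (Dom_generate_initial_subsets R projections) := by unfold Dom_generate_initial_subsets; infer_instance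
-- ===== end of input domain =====

-- B groups R's elements by their membership signature across the projections in one pass and
-- emits the groups in descending signature order, instead of A's repeated splitting of every
-- subset by every projection (objective: alternative algorithm; equality of return values).


-- ===== PORT A =====
def get_subsets (R : List Int) (projection : List Int) : List (List Int) :=
  let in_projection := PySem.Set.inter R projection
  let not_in_projection := PySem.Set.diff R projection
  let subsets := if !in_projection.isEmpty then [in_projection] else []
  if !not_in_projection.isEmpty then subsets ++ [not_in_projection] else subsets

def generate_initial_subsets (R : List Int) (projections : List (List Int)) : List (List Int) :=
  projections.foldl
    (fun subsets projection =>
      subsets.foldl (fun new_subsets subset => new_subsets ++ get_subsets subset projection) [])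
    [R]

-- ===== PORT B =====
def generate_initial_subsets_alt (R : List Int) (projections : List (List Int)) : List (List Int) :=
  let proj_sets := projections.map (fun p => PySem.Set.ofList p)
  let groups : PySem.Dict Nat (List Int) :=
    R.foldl
      (fun groups x =>
        groups.modify
          (proj_sets.foldl (fun mask p => mask * 2 + (if PySem.Set.contains p x then 1 else 0)) 0)
          [] (fun g => g ++ [x]))
      PySem.Dict.empty
  -- groups[m] for m in sorted keys: m is always a key, so getD is exact here
  (PySem.List.sorted groups.keys (fun m => m) true).map
    (fun m => PySem.Set.ofList (groups.getD m []))

-- ===== PRECONDITION & SPEC =====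
-- R is a Python set; Pre_ restricts its List Int representation to the faithful one
-- (distinct elements) — a list with duplicates denotes no Python set at all
-- (Python A, given such a non-set value, would raise AttributeError).
def Pre_generate_initial_subsets (R : List Int) (projections : List (List Int)) : Prop :=
  R.Nodup
instance (R : List Int) (projections : List (List Int)) : Decidable (Pre_generate_initial_subsets R projections) := by unfold Pre_generate_initial_subsets; infer_instance

def pvWitness_generate_initial_subsets : List Int × List (List Int) := ([1, 2], [[1]])

-- On R = ∅ with no projections A returns [∅] (an artefact of initialising the subset list with R
-- before filtering out empties); B returns [], the intended partition of ∅ into nonempty blocks.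
def D_generate_initial_subsets (R : List Int) (projections : List (List Int)) : Prop :=
  R = [] ∧ projections = []
instance (R : List Int) (projections : List (List Int)) : Decidable (D_generate_initial_subsets R projections) := by unfold D_generate_initial_subsets; infer_instance

def Spec_generate_initial_subsets (R : List Int) (projections : List (List Int)) (out : List (List Int)) : Prop := ¬ D_generate_initial_subsets R projections → out = generate_initial_subsets_alt R projections
instance (R : List Int) (projections : List (List Int)) (out : List (List Int)) : Decidable (Spec_generate_initial_subsets R projections out) := by unfold Spec_generate_initial_subsets; infer_instance

def pvDiffWitness_generate_initial_subsets : List Int × List (List Int) := ([], [])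
def pvDiffWitnessOut_generate_initial_subsets : (List (List Int)) × (List (List Int)) := ([[]], [])

-- ===== CLAIM (what is proved, stated in full; the proofs are below) =====
def Claim_unchanged_generate_initial_subsets : Prop := ∀ (R : List Int) (projections : List (List Int)), Dom_generate_initial_subsets R projections → Pre_generate_initial_subsets R projections → Spec_generate_initial_subsets R projections (generate_initial_subsets R projections)
def Claim_changed_generate_initial_subsets : Prop := Dom_generate_initial_subsets (pvDiffWitness_generate_initial_subsets.1) (pvDiffWitness_generate_initial_subsets.2) ∧ Pre_generate_initial_subsets (pvDiffWitness_generate_initial_subsets.1) (pvDiffWitness_generate_initial_subsets.2) ∧ D_generate_initial_subsets (pvDiffWitness_generate_initial_subsets.1) (pvDiffWitness_generate_initial_subsets.2) ∧ generate_initial_subsets (pvDiffWitness_generate_initial_subsets.1) (pvDiffWitness_generate_initial_subsets.2) = pvDiffWitnessOut_generate_initial_subsets.1 ∧ generate_initial_subsets_alt (pvDiffWitness_generate_initial_subsets.1) (pvDiffWitness_generate_initial_subsets.2) = pvDiffWitnessOut_generate_initial_subsets.2 ∧ pvDiffWitnessOut_generate_initial_subsets.1 ≠ pvDiffWitnessO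ut_generate_initial_subsets.2
def Claim_exact_generate_initial_subsets : Prop := ∀ (R : List Int) (projections : List (List Int)), Dom_generate_initial_subsets R projections → Pre_generate_initial_subsets R projections → D_generate_initial_subsets R projections → generate_initial_subsets R projections ≠ generate_initial_subsets_alt R projections

-- ===== LEMMAS AND PROOFS =====

-- the membership signature of x across the projections (first projection = most significant bit)
def sigOf (pss : List (List Int)) (x : Int) : Nat :=
  pss.foldl (fun m p => m * 2 + (if p.contains x then 1 else 0)) 0

-- the group of elements of S whose signature is m
def grp (S : List Int) (pss : List (List Int)) (m : Nat) : List Int :=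
  S.filter (fun x => sigOf pss x == m)

-- all k-bit signatures in descending order
def descMasks : Nat → List Nat
  | 0 => [0]
  | k + 1 => (descMasks k).map (fun m => 2 ^ k + m) ++ descMasks k

-- A's result, characterised: the nonempty groups, in descending signature order
def partsA (S : List Int) (pss : List (List Int)) : List (List Int) :=
  (descMasks pss.length).filterMap
    (fun m => if (grp S pss m).isEmpty then none else some (grp S pss m))

-- ---------- signature arithmetic ----------

theorem sig_aux (x : Int) : ∀ (t : List (List Int)) (m0 : Nat),
    t.foldl (fun m p => m * 2 + (if p.contains x then 1 else 0)) m0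
      = m0 * 2 ^ t.length + sigOf t x := by
  intro t
  induction t with
  | nil => intro m0; simp [sigOf]
  | cons p t ih =>
      intro m0
      simp only [sigOf, List.foldl_cons]
      conv_rhs => rw [ih]
      rw [ih]
      simp only [List.length_cons, pow_succ]
      ring

theorem sigOf_cons (p : List Int) (t : List (List Int)) (x : Int) :
    sigOf (p :: t) x = (if p.contains x then 2 ^ t.length else 0) + sigOf t x := by
  rw [sigOf, List.foldl_cons, sig_aux]
  by_cases h : p.contains x = true <;> simp [h]

theorem sig_lt (pss : List (List Int)) (x : Int) : sigOf pss x < 2 ^ pss.length := by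
  induction pss with
  | nil => simp [sigOf]
  | cons p t ih =>
      rw [sigOf_cons, List.length_cons, pow_succ]
      by_cases h : x ∈ p <;> simp [h] <;> omega

-- ---------- descMasks ----------

theorem mem_descMasks (k : Nat) : ∀ m : Nat, m ∈ descMasks k ↔ m < 2 ^ k := by
  induction k with
  | zero => intro m; simp [descMasks]
  | succ k ih =>
      intro m
      simp only [descMasks, List.mem_append, List.mem_map, pow_succ]
      constructor
      · rintro (⟨a, ha, rfl⟩ | h)
        · have := (ih a).mp ha; omega
        · have := (ih m).mp h; omega
      · intro h
        by_cases hm : m < 2 ^ k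
        · exact Or.inr ((ih m).mpr hm)
        · exact Or.inl ⟨m - 2 ^ k, (ih _).mpr (by omega), by omega⟩

theorem descMasks_pairwise (k : Nat) : (descMasks k).Pairwise (· > ·) := by
  induction k with
  | zero => simp [descMasks]
  | succ k ih =>
      rw [descMasks, List.pairwise_append]
      refine ⟨List.Pairwise.map _ (fun a b h => by omega) ih, ih, ?_⟩
      intro a ha b hb
      simp only [List.mem_map] at ha
      obtain ⟨a', ha', rfl⟩ := ha
      have := (mem_descMasks k b).mp hb
      omega

theorem descMasks_nodup (k : Nat) : (descMasks k).Nodup :=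
  (descMasks_pairwise k).imp (fun h => by omega)

-- ---------- A-side ----------

-- one step of A's outer loop
def stepA (l : List (List Int)) (p : List Int) : List (List Int) :=
  l.foldl (fun new_subsets subset => new_subsets ++ get_subsets subset p) []

theorem stepA_eq (l : List (List Int)) (p : List Int) :
    stepA l p = l.flatMap (fun s => get_subsets s p) := by
  rw [stepA, PySem.List.foldl_append_eq_flatMap]; simp

def genFrom (l : List (List Int)) (pss : List (List Int)) : List (List Int) :=
  pss.foldl (fun subsets projection => stepA subsets projection) l

theorem gen_eq_genFrom (R : List Int) (pss : List (List Int)) :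
    generate_initial_subsets R pss = genFrom [R] pss := rfl

theorem genFrom_cons (l : List (List Int)) (p : List Int) (t : List (List Int)) :
    genFrom l (p :: t) = genFrom (stepA l p) t := rfl

theorem genFrom_nil : ∀ pss : List (List Int), genFrom [] pss = [] := by
  intro pss
  induction pss with
  | nil => rfl
  | cons p t ih =>
      rw [genFrom_cons, show stepA [] p = [] from rfl]
      exact ih

theorem genFrom_append (pss : List (List Int)) : ∀ l1 l2 : List (List Int),
    genFrom (l1 ++ l2) pss = genFrom l1 pss ++ genFrom l2 pss := by
  induction pss with
  | nil => intro l1 l2; rfl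
  | cons p t ih =>
      intro l1 l2
      rw [genFrom_cons, genFrom_cons l1, genFrom_cons l2, stepA_eq, List.flatMap_append,
        ← stepA_eq, ← stepA_eq, ih]

theorem inter_eq (S p : List Int) :
    PySem.Set.inter S p = S.filter (fun x => p.contains x) := rfl

theorem diff_eq (S p : List Int) :
    PySem.Set.diff S p = S.filter (fun x => !p.contains x) := rfl

theorem get_subsets_eq (S p : List Int) :
    get_subsets S p =
      (if (S.filter (fun x => p.contains x)).isEmpty then []
        else [S.filter (fun x => p.contains x)]) ++
      (if (S.filter (fun x => !p.contains x)).isEmpty then []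
        else [S.filter (fun x => !p.contains x)]) := by
  by_cases h1 : (S.filter (fun x => p.contains x)).isEmpty = true <;>
    by_cases h2 : (S.filter (fun x => !p.contains x)).isEmpty = true <;>
      simp only [get_subsets, inter_eq, diff_eq, h1, h2, Bool.not_true, Bool.not_false,
        if_true, if_false, Bool.false_eq_true, List.nil_append, List.append_nil,
        List.singleton_append]

theorem stepA_singleton (S p : List Int) : stepA [S] p = get_subsets S p := by
  rw [stepA_eq]; simp

-- group splitting along the head projection
theorem grp_cons_hi (S p : List Int) (t : List (List Int)) (m : Nat) (hm : m < 2 ^ t.length) :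
    grp S (p :: t) (2 ^ t.length + m) = grp (S.filter (fun x => p.contains x)) t m := by
  rw [grp, grp, List.filter_filter]
  apply List.filter_congr
  intro x _
  rw [Bool.eq_iff_iff, sigOf_cons]
  have hs := sig_lt t x
  by_cases h : x ∈ p <;> simp [h] <;> omega

theorem grp_cons_lo (S p : List Int) (t : List (List Int)) (m : Nat) (hm : m < 2 ^ t.length) :
    grp S (p :: t) m = grp (S.filter (fun x => !p.contains x)) t m := by
  rw [grp, grp, List.filter_filter]
  apply List.filter_congr
  intro x _
  rw [Bool.eq_iff_iff, sigOf_cons]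
  have hs := sig_lt t x
  by_cases h : x ∈ p <;> simp [h] <;> omega

theorem grp_nil_left (pss : List (List Int)) (m : Nat) : grp [] pss m = [] := rfl

theorem partsA_nil_left (pss : List (List Int)) : partsA [] pss = [] := by
  rw [partsA]
  rw [List.filterMap_congr (g := fun _ => none) (fun m _ => by rw [grp_nil_left]; simp)]
  simp

theorem partsA_cons (S p : List Int) (t : List (List Int)) :
    partsA S (p :: t) =
      partsA (S.filter (fun x => p.contains x)) t ++
        partsA (S.filter (fun x => !p.contains x)) t := by
  rw [partsA, partsA, partsA]
  simp only [List.length_cons]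
  rw [descMasks, List.filterMap_append, List.filterMap_map]
  congr 1
  · apply List.filterMap_congr
    intro m hm
    have hlt := (mem_descMasks t.length m).mp hm
    simp only [Function.comp]
    rw [grp_cons_hi S p t m hlt]
  · apply List.filterMap_congr
    intro m hm
    have hlt := (mem_descMasks t.length m).mp hm
    rw [grp_cons_lo S p t m hlt]

theorem A_char : ∀ (pss : List (List Int)) (S : List Int), S ≠ [] →
    generate_initial_subsets S pss = partsA S pss := by
  intro pss
  induction pss with
  | nil =>
      intro S hS
      have hgrp : grp S [] 0 = S := by
        rw [grp]; apply List.filter_eq_self.mpr; intro x _; simp [sigOf]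
      simp [generate_initial_subsets, partsA, descMasks, hgrp, hS]
  | cons p t ih =>
      intro S hS
      rw [gen_eq_genFrom, genFrom_cons, stepA_singleton, get_subsets_eq, genFrom_append]
      have hin : genFrom
            (if (S.filter (fun x => p.contains x)).isEmpty then []
              else [S.filter (fun x => p.contains x)]) t
          = partsA (S.filter (fun x => p.contains x)) t := by
        by_cases h : (S.filter (fun x => p.contains x)).isEmpty
        · rw [if_pos h, genFrom_nil, List.isEmpty_iff.mp h, partsA_nil_left]
        · rw [if_neg h, ← gen_eq_genFrom, ih _ (by simpa [List.isEmpty_iff] using h)]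
      have hout : genFrom
            (if (S.filter (fun x => !p.contains x)).isEmpty then []
              else [S.filter (fun x => !p.contains x)]) t
          = partsA (S.filter (fun x => !p.contains x)) t := by
        by_cases h : (S.filter (fun x => !p.contains x)).isEmpty
        · rw [if_pos h, genFrom_nil, List.isEmpty_iff.mp h, partsA_nil_left]
        · rw [if_neg h, ← gen_eq_genFrom, ih _ (by simpa [List.isEmpty_iff] using h)]
      rw [hin, hout, partsA_cons]

-- ---------- B-side ----------

theorem contains_ofList (p : List Int) (x : Int) :
    PySem.Set.contains (PySem.Set.ofList p) x = p.contains x := by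
  rw [Bool.eq_iff_iff, PySem.Set.contains_iff, PySem.Set.mem_ofList]
  simp

-- the mask computed by B over the materialised projection sets is sigOf
theorem sigB_aux (x : Int) : ∀ (pss : List (List Int)) (m0 : Nat),
    (pss.map (fun p => PySem.Set.ofList p)).foldl
        (fun mask p => mask * 2 + (if PySem.Set.contains p x then 1 else 0)) m0
      = pss.foldl (fun m p => m * 2 + (if p.contains x then 1 else 0)) m0 := by
  intro pss
  induction pss with
  | nil => intro m0; rfl
  | cons p t ih =>
      intro m0
      simp only [List.map_cons, List.foldl_cons, contains_ofList]
      exact ih _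

def groupsB (R : List Int) (pss : List (List Int)) : PySem.Dict Nat (List Int) :=
  R.foldl (fun groups x => groups.modify (sigOf pss x) [] (fun g => g ++ [x])) PySem.Dict.empty

theorem alt_eq (R : List Int) (pss : List (List Int)) :
    generate_initial_subsets_alt R pss =
      (PySem.List.sorted (groupsB R pss).keys (fun m => m) true).map
        (fun m => PySem.Set.ofList ((groupsB R pss).getD m [])) := by
  rw [generate_initial_subsets_alt]
  have h : (fun (groups : PySem.Dict Nat (List Int)) (x : Int) =>
      groups.modify
        ((pss.map (fun p => PySem.Set.ofList p)).foldl
          (fun mask p => mask * 2 + (if PySem.Set.contains p x then 1 else 0)) 0)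
        [] (fun g => g ++ [x]))
      = (fun groups x => groups.modify (sigOf pss x) [] (fun g => g ++ [x])) := by
    funext groups x
    rw [sigB_aux, ← sigOf]
  rw [h]
  rfl

theorem groupsB_pairs (R : List Int) (pss : List (List Int)) :
    groupsB R pss =
      (R.map (fun x => (sigOf pss x, x))).foldl
        (fun d p => d.modify p.1 [] (fun g => g ++ [p.2])) PySem.Dict.empty := by
  rw [List.foldl_map]
  rfl

theorem groupsB_getD (R : List Int) (pss : List (List Int)) (m : Nat) :
    (groupsB R pss).getD m [] = grp R pss m := by
  rw [groupsB_pairs, PySem.Dict.getD_foldl_modify_append, List.filter_map, List.map_map]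
  rw [show (PySem.Dict.empty : PySem.Dict Nat (List Int)).getD m [] = [] from rfl,
    List.nil_append, grp]
  have hmap : ((fun (x : Nat × Int) => x.2) ∘ fun x => (sigOf pss x, x)) = fun x : Int => x := rfl
  rw [hmap, List.map_id_fun']
  apply List.filter_congr
  intro x _
  rfl

theorem groupsB_keys (R : List Int) (pss : List (List Int)) :
    (groupsB R pss).keys = PySem.Set.ofList (R.map (fun x => sigOf pss x)) := by
  rw [groupsB,
    show (fun (groups : PySem.Dict Nat (List Int)) (x : Int) =>
        groups.modify (sigOf pss x) [] (fun g => g ++ [x]))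
      = (fun d x => d.modify ((fun x => sigOf pss x) x) []
          ((fun (d : PySem.Dict Nat (List Int)) (x : Int) (g : List Int) => g ++ [x]) d x)) from rfl]
  rw [PySem.Dict.keys_foldl_modify_key]
  rw [show (PySem.Dict.empty : PySem.Dict Nat (List Int)).keys = [] from rfl,
    PySem.Set.update_nil_left]

theorem mem_keys_iff_grp_ne (R : List Int) (pss : List (List Int)) (m : Nat) :
    m ∈ (groupsB R pss).keys ↔ grp R pss m ≠ [] := by
  rw [groupsB_keys, PySem.Set.mem_ofList, grp, Ne, List.filter_eq_nil_iff]
  push_neg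
  constructor
  · rintro h
    rw [List.mem_map] at h
    obtain ⟨x, hx, rfl⟩ := h
    exact ⟨x, hx, by simp⟩
  · rintro ⟨x, hx, h⟩
    rw [List.mem_map]
    exact ⟨x, hx, by simpa using h⟩

-- B's sorted key list is descMasks restricted to the keys present
theorem sorted_keys_eq (R : List Int) (pss : List (List Int)) :
    PySem.List.sorted (groupsB R pss).keys (fun m => m) true
      = (descMasks pss.length).filter (fun m => decide (m ∈ (groupsB R pss).keys)) := by
  apply PySem.List.sorted_rev_eq_of_perm_of_pairwise_gt
  · rw [List.perm_ext_iff_of_nodup]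
    · intro m
      simp only [List.mem_filter, decide_eq_true_eq, mem_descMasks]
      constructor
      · rintro ⟨_, h⟩; exact h
      · intro h
        refine ⟨?_, h⟩
        rw [groupsB_keys, PySem.Set.mem_ofList, List.mem_map] at h
        obtain ⟨x, _, rfl⟩ := h
        exact sig_lt pss x
    · exact (descMasks_nodup pss.length).filter _
    · rw [groupsB_keys]; exact PySem.Set.nodup_ofList _
  · exact ((descMasks_pairwise pss.length).filter _).imp (fun h => h)

-- generic: filterMap of "if empty then none" is map over filter
theorem filterMap_if_empty (g : Nat → List Int) : ∀ L : List Nat,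
    L.filterMap (fun m => if (g m).isEmpty then none else some (g m))
      = (L.filter (fun m => !(g m).isEmpty)).map g := by
  intro L
  induction L with
  | nil => rfl
  | cons m t ih =>
      by_cases h : (g m).isEmpty
      · rw [List.filterMap_cons_none (by rw [if_pos h]),
          List.filter_cons_of_neg (by simp [h]), ih]
      · rw [List.filterMap_cons_some (by rw [if_neg h]),
          List.filter_cons_of_pos (by simp [h]), List.map_cons, ih]

theorem B_char (R : List Int) (pss : List (List Int)) (hnd : R.Nodup) :
    generate_initial_subsets_alt R pss = partsA R pss := by
  rw [alt_eq, sorted_keys_eq, partsA, filterMap_if_empty]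
  have hcond : (descMasks pss.length).filter (fun m => decide (m ∈ (groupsB R pss).keys))
      = (descMasks pss.length).filter (fun m => !(grp R pss m).isEmpty) := by
    apply List.filter_congr
    intro m _
    rw [Bool.eq_iff_iff]
    simp [mem_keys_iff_grp_ne]
  rw [hcond]
  apply List.map_congr_left
  intro m _
  rw [groupsB_getD]
  exact PySem.Set.ofList_eq_self_of_nodup _ (hnd.filter _)

-- A on an empty R with at least one projection returns []
theorem A_nil (p : List Int) (t : List (List Int)) :
    generate_initial_subsets [] (p :: t) = [] := by
  rw [gen_eq_genFrom, genFrom_cons, stepA_singleton,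
    show get_subsets [] p = [] from rfl]
  exact genFrom_nil t

theorem B_nil (pss : List (List Int)) : generate_initial_subsets_alt [] pss = [] := by
  rw [alt_eq]
  rw [show (groupsB [] pss).keys = [] from rfl]
  rfl

-- ===== VERDICT (by name: the statement is the Claim_ definition above) =====
theorem generate_initial_subsets_spec : Claim_unchanged_generate_initial_subsets := by
  intro R pss _ hpre hnD
  cases R with
  | nil =>
      cases pss with
      | nil => exact absurd ⟨rfl, rfl⟩ hnD
      | cons p t => rw [A_nil, B_nil]
  | cons x R' =>
      rw [A_char pss (x :: R') (by simp), B_char (x :: R') pss hpre]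

theorem generate_initial_subsets_changed : Claim_changed_generate_initial_subsets := by
  unfold Claim_changed_generate_initial_subsets; decide

theorem generate_initial_subsets_tight : Claim_exact_generate_initial_subsets := by
  intro R pss _ _ hD
  obtain ⟨rfl, rfl⟩ := hD
  decide
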